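-- pv_equiv track=rewrite | github.com/ChuangJayFD/JAYBIRDS | sync_screenshots.py | ext_from
-- ===== SOURCE A (Python) =====
-- def ext_from(filename, mime):
--     """拡張子を判定する"""
--     if filename:
--         for e in ('.jpg', '.jpeg', '.png', '.webp', '.gif'):
--             if filename.lower().endswith(e):
--                 return e.lstrip('.')
--     if 'jpeg' in mime: return 'jpg'
--     if 'png'  in mime: return 'png'
--     if 'webp' in mime: return 'webp'
--     return 'jpg'
-- ===== SOURCE B (Python) =====
-- # Compute the extension once: lowercase, take the suffix from the last '.', and
-- # look it up in a dict, instead of five endswith scans.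
-- _EXT_MAP = {'.jpg': 'jpg', '.jpeg': 'jpeg', '.png': 'png', '.webp': 'webp', '.gif': 'gif'}
--
-- def ext_from(filename, mime):
--     """拡張子を判定する"""
--     if filename:
--         low = filename.lower()
--         i = low.rfind('.')
--         suf = low[i:] if i >= 0 else ''
--         if suf in _EXT_MAP:
--             return _EXT_MAP[suf]
--     if 'jpeg' in mime: return 'jpg'
--     if 'png'  in mime: return 'png'
--     if 'webp' in mime: return 'webp'
--     return 'jpg'
-- ===== Notes on version B (the rewrite author's own statement) =====
-- stated objective: simpler
-- what changed: B computes the lowercased filename's last-dot suffix once (rfind + slice) and looks it up in a dict of the five allowed extensions, instead of A's loop of five endswith scans that re-lowercases the whole name on each iteration; the mime fallthrough chain is unchanged.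
import Mathlib
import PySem

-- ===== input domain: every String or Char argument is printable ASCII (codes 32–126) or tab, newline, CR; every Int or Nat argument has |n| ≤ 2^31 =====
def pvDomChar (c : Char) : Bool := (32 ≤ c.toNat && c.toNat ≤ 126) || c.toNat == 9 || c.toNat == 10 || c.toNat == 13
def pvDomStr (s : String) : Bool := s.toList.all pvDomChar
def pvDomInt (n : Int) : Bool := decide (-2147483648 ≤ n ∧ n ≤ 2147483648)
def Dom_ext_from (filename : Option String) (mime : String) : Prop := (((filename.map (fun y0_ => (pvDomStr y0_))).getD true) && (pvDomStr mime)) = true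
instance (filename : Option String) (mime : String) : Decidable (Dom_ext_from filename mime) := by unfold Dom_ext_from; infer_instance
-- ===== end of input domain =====

-- B replaces A's five endswith scans by one last-dot suffix extraction plus a dict lookup (simpler, one scan).

-- ===== PORT A =====
-- the mime fallthrough chain, textually identical in A and in B
def pvMimeChain (mime : String) : String :=
  if PySem.Str.isIn "jpeg" mime then "jpg"
  else if PySem.Str.isIn "png" mime then "png"
  else if PySem.Str.isIn "webp" mime then "webp"
  else "jpg"

-- e.lstrip('.') ported by hand (only applied to the five literals): drop leading '.' characters — exact for this call
def pvLstripDot (e : String) : String := String.ofList (e.toList.dropWhile (fun c => c == '.'))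

-- the 'for e in (…): if filename.lower().endswith(e): return e.lstrip('.')' loop
def pvExtLoop (low : String) : List String → Option String
  | [] => none
  | e :: rest => if PySem.Str.endswith low e then some (pvLstripDot e) else pvExtLoop low rest

def ext_from (filename : Option String) (mime : String) : String :=
  match filename with
  | some s =>
      if s ≠ "" then
        match pvExtLoop (PySem.Str.lower s) [".jpg", ".jpeg", ".png", ".webp", ".gif"] with
        | some r => r
        | none => pvMimeChain mime
      else pvMimeChain mime
  | none => pvMimeChain mime

-- ===== PORT B =====
def pvExtMap : PySem.Dict String String :=
  ⟨[(".jpg", "jpg"), (".jpeg", "jpeg"), (".png", "png"), (".webp", "webp"), (".gif", "gif")]⟩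

def ext_from_alt (filename : Option String) (mime : String) : String :=
  match filename with
  | some s =>
      if s ≠ "" then
        let low := PySem.Str.lower s
        let i := PySem.Str.rfind low "."
        let suf := if 0 ≤ i then PySem.Str.slice low (some i) none else ""
        match PySem.Dict.get? pvExtMap suf with
        | some v => v
        | none => pvMimeChain mime
      else pvMimeChain mime
  | none => pvMimeChain mime

-- ===== PRECONDITION & SPEC =====
def Spec_ext_from (filename : Option String) (mime : String) (out : String) : Prop := out = ext_from_alt filename mime
instance (filename : Option String) (mime : String) (out : String) : Decidable (Spec_ext_from filename mime out) := by unfold Spec_ext_from; infer_instance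

-- ===== CLAIM (what is proved, stated in full; the proofs are below) =====
def Claim_equal_ext_from : Prop := ∀ (filename : Option String) (mime : String), Dom_ext_from filename mime → Spec_ext_from filename mime (ext_from filename mime)

-- ===== LEMMAS AND PROOFS =====

lemma pvPrefixDot_iff (l : List Char) : List.isPrefixOf ['.'] l = true ↔ ∃ u, l = '.'::u := by
  cases l with
  | nil => simp [List.isPrefixOf]
  | cons a l => simp [List.isPrefixOf]; exact eq_comm

lemma pvGo_succ (t : List Char) (n : Nat) :
    PySem.Chars.rfind.go t ['.'] (n+1)
      = if List.isPrefixOf ['.'] (t.drop (n+1)) then ((n+1 : Nat) : Int) else PySem.Chars.rfind.go t ['.'] n := by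
  simp [PySem.Chars.rfind.go]

lemma pvGo_zero (t : List Char) :
    PySem.Chars.rfind.go t ['.'] 0 = if List.isPrefixOf ['.'] t then 0 else -1 := by
  simp [PySem.Chars.rfind.go]

lemma pvGo_nonneg_of (t : List Char) (n j : Nat) (hj : j ≤ n)
    (h : List.isPrefixOf ['.'] (t.drop j) = true) : 0 ≤ PySem.Chars.rfind.go t ['.'] n := by
  induction n with
  | zero =>
      have hj0 : j = 0 := Nat.le_zero.mp hj
      subst hj0
      rw [List.drop_zero] at h
      rw [pvGo_zero, if_pos h]
  | succ n ih =>
      rw [pvGo_succ]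
      by_cases hp : List.isPrefixOf ['.'] (t.drop (n+1)) = true
      · rw [if_pos hp]; exact Int.natCast_nonneg _
      · rw [if_neg hp]
        apply ih
        by_cases hj' : j = n+1
        · exact absurd (hj' ▸ h) hp
        · omega

lemma pvGo_eq_of (t : List Char) (n p : Nat) (hpn : p ≤ n)
    (hp : List.isPrefixOf ['.'] (t.drop p) = true)
    (hq : ∀ q, p < q → q ≤ n → List.isPrefixOf ['.'] (t.drop q) = false) :
    PySem.Chars.rfind.go t ['.'] n = (p : Int) := by
  induction n with
  | zero =>
      have hp0 : p = 0 := Nat.le_zero.mp hpn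
      subst hp0
      rw [List.drop_zero] at hp
      rw [pvGo_zero, if_pos hp]; simp
  | succ n ih =>
      rw [pvGo_succ]
      by_cases hcase : p = n + 1
      · subst hcase; rw [if_pos hp]
      · have hfalse : List.isPrefixOf ['.'] (t.drop (n+1)) = false := hq (n+1) (by omega) (le_refl _)
        rw [if_neg (by simp [hfalse])]
        exact ih (by omega) (fun q h1 h2 => hq q h1 (by omega))

lemma pvGo_spec (t : List Char) (n : Nat) (h : 0 ≤ PySem.Chars.rfind.go t ['.'] n) :
    (PySem.Chars.rfind.go t ['.'] n).toNat ≤ n ∧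
    List.isPrefixOf ['.'] (t.drop (PySem.Chars.rfind.go t ['.'] n).toNat) = true ∧
    ∀ q, (PySem.Chars.rfind.go t ['.'] n).toNat < q → q ≤ n →
      List.isPrefixOf ['.'] (t.drop q) = false := by
  induction n with
  | zero =>
      rw [pvGo_zero] at h ⊢
      by_cases hp : List.isPrefixOf ['.'] t = true
      · rw [if_pos hp]
        refine ⟨by simp, by simpa using hp, fun q h1 h2 => ?_⟩
        simp at h1; omega
      · rw [if_neg hp] at h; exact absurd h (by decide)
  | succ n ih =>
      rw [pvGo_succ] at h ⊢
      by_cases hp : List.isPrefixOf ['.'] (t.drop (n+1)) = true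
      · rw [if_pos hp] at h ⊢
        have htn : (((n+1 : Nat) : Int)).toNat = n+1 := by simp
        rw [htn]
        exact ⟨le_refl _, hp, fun q h1 h2 => absurd h1 (by omega)⟩
      · rw [if_neg hp] at h ⊢
        obtain ⟨h1, h2, h3⟩ := ih h
        refine ⟨by omega, h2, fun q hq1 hq2 => ?_⟩
        by_cases hq' : q = n+1
        · subst hq'; exact Bool.eq_false_iff.mpr hp
        · exact h3 q hq1 (by omega)

lemma pvRfind_nonneg_of_mem (t : List Char) (h : '.' ∈ t) :
    0 ≤ PySem.Chars.rfind t ['.'] := by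
  obtain ⟨i, hi, hget⟩ := List.mem_iff_getElem.mp h
  have hdrop : t.drop i = '.' :: t.drop (i+1) := by
    rw [List.drop_eq_getElem_cons hi, hget]
  apply pvGo_nonneg_of t t.length i (by omega)
  rw [hdrop]; exact (pvPrefixDot_iff _).mpr ⟨_, rfl⟩

lemma pvRfind_dot_split (pre rest : List Char) (hnd : '.' ∉ rest) :
    PySem.Chars.rfind (pre ++ '.'::rest) ['.'] = (pre.length : Int) := by
  apply pvGo_eq_of
  · simp
  · rw [List.drop_left]; exact (pvPrefixDot_iff _).mpr ⟨_, rfl⟩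
  · intro q h1 h2
    have hdrop : (pre ++ '.'::rest).drop q = rest.drop (q - pre.length - 1) := by
      rw [List.drop_append, List.drop_eq_nil_of_le (by omega : pre.length ≤ q), List.nil_append]
      obtain ⟨m, hm⟩ : ∃ m, q - pre.length = m + 1 := ⟨q - pre.length - 1, by omega⟩
      rw [hm, List.drop_succ_cons, Nat.add_sub_cancel]
    rw [hdrop]
    by_contra hc
    obtain ⟨u, hu⟩ := (pvPrefixDot_iff _).mp (by simpa using hc)
    exact hnd (List.drop_subset _ _ (hu ▸ List.mem_cons_self))

lemma pvRfind_spec (t : List Char) (h : 0 ≤ PySem.Chars.rfind t ['.']) :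
    ∃ u, t.drop (PySem.Chars.rfind t ['.']).toNat = '.'::u ∧ '.' ∉ u := by
  have hrg : PySem.Chars.rfind t ['.'] = PySem.Chars.rfind.go t ['.'] t.length := rfl
  rw [hrg] at h ⊢
  obtain ⟨h1, h2, h3⟩ := pvGo_spec t t.length h
  obtain ⟨u, hu⟩ := (pvPrefixDot_iff _).mp h2
  set r := (PySem.Chars.rfind.go t ['.'] t.length).toNat with hr
  refine ⟨u, hu, fun hm => ?_⟩
  obtain ⟨k, hk, hget⟩ := List.mem_iff_getElem.mp hm
  have hlen : (t.drop r).length = u.length + 1 := by rw [hu]; simp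
  rw [List.length_drop] at hlen
  have hstep : t.drop (r + 1 + k) = u.drop k := by
    have hdd : t.drop (r + 1 + k) = (t.drop r).drop (1 + k) := by
      rw [List.drop_drop]; congr 1; omega
    rw [hdd, hu]
    have h1k : (1 + k) = k + 1 := by omega
    rw [h1k, List.drop_succ_cons]
  have hpref : List.isPrefixOf ['.'] (t.drop (r + 1 + k)) = true := by
    rw [hstep, List.drop_eq_getElem_cons hk, hget]
    exact (pvPrefixDot_iff _).mpr ⟨_, rfl⟩
  have hfalse := h3 (r + 1 + k) (by omega) (by omega)
  rw [hfalse] at hpref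
  exact Bool.false_ne_true hpref

lemma pvEndswith_dot_iff (t rest : List Char) (hnd : '.' ∉ rest) :
    PySem.Chars.endswith t ('.'::rest) = true ↔
      0 ≤ PySem.Chars.rfind t ['.'] ∧ t.drop (PySem.Chars.rfind t ['.']).toNat = '.'::rest := by
  constructor
  · intro h
    obtain ⟨pre, hpre⟩ := (PySem.Chars.endswith_iff _ _).mp h
    subst hpre
    rw [pvRfind_dot_split pre rest hnd]
    exact ⟨Int.natCast_nonneg _, by rw [Int.toNat_natCast, List.drop_left]⟩
  · rintro ⟨h0, hd⟩
    exact (PySem.Chars.endswith_iff _ _).mpr (hd ▸ List.drop_suffix _ _)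

lemma pvEndswith_false_of_neg (t e : List Char) (h : ¬ 0 ≤ PySem.Chars.rfind t ['.'])
    (hdot : '.' ∈ e) : PySem.Chars.endswith t e = false := by
  by_contra hc
  have hc' : PySem.Chars.endswith t e = true := by simpa using hc
  obtain ⟨pre, hpre⟩ := (PySem.Chars.endswith_iff _ _).mp hc'
  exact h (pvRfind_nonneg_of_mem t (hpre ▸ (List.mem_append.mpr (Or.inr hdot))))

-- the central bridge: A's endswith loop computes exactly B's last-dot-suffix dict lookup
lemma pvLoop_eq_lookup (low : String) :
    pvExtLoop low [".jpg", ".jpeg", ".png", ".webp", ".gif"]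
      = PySem.Dict.get? pvExtMap
          (if 0 ≤ PySem.Str.rfind low "." then PySem.Str.slice low (some (PySem.Str.rfind low ".")) none else "") := by
  have hr : PySem.Str.rfind low "." = PySem.Chars.rfind low.toList ['.'] := by
    rw [PySem.Str.rfind_eq]; rfl
  by_cases h0 : 0 ≤ PySem.Chars.rfind low.toList ['.']
  · obtain ⟨u, hdrop, hnd⟩ := pvRfind_spec low.toList h0
    have hsuf : (PySem.Str.slice low (some (PySem.Str.rfind low ".")) none).toList = '.'::u := by
      rw [PySem.Str.toList_slice, hr]
      show PySem.List.slice low.toList (some (PySem.Chars.rfind low.toList ['.'])) none = _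
      rw [PySem.List.slice_from _ h0, hdrop]
    have key : ∀ rest : List Char, '.' ∉ rest →
        (PySem.Chars.endswith low.toList ('.'::rest) = true ↔ ('.'::u = '.'::rest)) := by
      intro rest hnd'
      rw [pvEndswith_dot_iff low.toList rest hnd', hdrop]
      constructor
      · rintro ⟨-, h⟩; rw [← h]
      · intro h; exact ⟨h0, by rw [h]⟩
    have h0' : 0 ≤ PySem.Str.rfind low "." := by rw [hr]; exact h0
    rw [if_pos h0']
    set suf := PySem.Str.slice low (some (PySem.Str.rfind low ".")) none with hsufdef
    have hsufeq : ∀ e : String, (suf = e) ↔ ('.'::u = e.toList) := by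
      intro e
      constructor
      · intro h; rw [← hsuf, h]
      · intro h; apply String.toList_inj.mp; rw [hsuf, h]
    have e1 := key ['j','p','g'] (by decide)
    have e2 := key ['j','p','e','g'] (by decide)
    have e3 := key ['p','n','g'] (by decide)
    have e4 := key ['w','e','b','p'] (by decide)
    have e5 := key ['g','i','f'] (by decide)
    by_cases c1 : '.'::u = ['.','j','p','g']
    · have hk1 : suf = ".jpg" := (hsufeq ".jpg").mpr c1
      simp [pvExtLoop, pvExtMap, PySem.Dict.get?, e1.mpr c1, hk1, pvLstripDot]
    · have hb1 : PySem.Chars.endswith low.toList ['.','j','p','g'] = false :=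
        Bool.eq_false_iff.mpr (fun hx => c1 (e1.mp hx))
      have hs1 : suf ≠ ".jpg" := fun hx => c1 ((hsufeq ".jpg").mp hx)
      by_cases c2 : '.'::u = ['.','j','p','e','g']
      · have hk2 : suf = ".jpeg" := (hsufeq ".jpeg").mpr c2
        simp [pvExtLoop, pvExtMap, PySem.Dict.get?, hb1, e2.mpr c2, hk2, pvLstripDot]
      · have hb2 : PySem.Chars.endswith low.toList ['.','j','p','e','g'] = false :=
          Bool.eq_false_iff.mpr (fun hx => c2 (e2.mp hx))
        have hs2 : suf ≠ ".jpeg" := fun hx => c2 ((hsufeq ".jpeg").mp hx)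
        by_cases c3 : '.'::u = ['.','p','n','g']
        · have hk3 : suf = ".png" := (hsufeq ".png").mpr c3
          simp [pvExtLoop, pvExtMap, PySem.Dict.get?, hb1, hb2, e3.mpr c3, hk3, pvLstripDot]
        · have hb3 : PySem.Chars.endswith low.toList ['.','p','n','g'] = false :=
            Bool.eq_false_iff.mpr (fun hx => c3 (e3.mp hx))
          have hs3 : suf ≠ ".png" := fun hx => c3 ((hsufeq ".png").mp hx)
          by_cases c4 : '.'::u = ['.','w','e','b','p']
          · have hk4 : suf = ".webp" := (hsufeq ".webp").mpr c4
            simp [pvExtLoop, pvExtMap, PySem.Dict.get?, hb1, hb2, hb3, e4.mpr c4, hk4, pvLstripDot]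
          · have hb4 : PySem.Chars.endswith low.toList ['.','w','e','b','p'] = false :=
              Bool.eq_false_iff.mpr (fun hx => c4 (e4.mp hx))
            have hs4 : suf ≠ ".webp" := fun hx => c4 ((hsufeq ".webp").mp hx)
            by_cases c5 : '.'::u = ['.','g','i','f']
            · have hk5 : suf = ".gif" := (hsufeq ".gif").mpr c5
              simp [pvExtLoop, pvExtMap, PySem.Dict.get?, hb1, hb2, hb3, hb4, e5.mpr c5, hk5, pvLstripDot]
            · have hb5 : PySem.Chars.endswith low.toList ['.','g','i','f'] = false :=
                Bool.eq_false_iff.mpr (fun hx => c5 (e5.mp hx))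
              have hs5 : suf ≠ ".gif" := fun hx => c5 ((hsufeq ".gif").mp hx)
              simp [pvExtLoop, pvExtMap, PySem.Dict.get?, hb1, hb2, hb3, hb4, hb5]
              exact ⟨fun h => hs1 h.symm, fun h => hs2 h.symm, fun h => hs3 h.symm,
                fun h => hs4 h.symm, fun h => hs5 h.symm⟩
  · have h0' : ¬ 0 ≤ PySem.Str.rfind low "." := by rw [hr]; exact h0
    rw [if_neg h0']
    have hfalse : ∀ e : List Char, '.' ∈ e → PySem.Chars.endswith low.toList e = false :=
      fun e he => pvEndswith_false_of_neg low.toList e h0 he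
    have f1 := hfalse ['.','j','p','g'] (by decide)
    have f2 := hfalse ['.','j','p','e','g'] (by decide)
    have f3 := hfalse ['.','p','n','g'] (by decide)
    have f4 := hfalse ['.','w','e','b','p'] (by decide)
    have f5 := hfalse ['.','g','i','f'] (by decide)
    simp [pvExtLoop, f1, f2, f3, f4, f5, pvExtMap, PySem.Dict.get?]

-- ===== VERDICT (by name: the statement is the Claim_ definition above) =====
theorem ext_from_spec : Claim_equal_ext_from := by
  intro filename mime _
  unfold Spec_ext_from
  cases filename with
  | none => rfl
  | some s =>
      by_cases hs : s ≠ ""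
      · simp only [ext_from, ext_from_alt, if_pos hs]
        exact congrArg
          (fun o => match o with | some r => r | none => pvMimeChain mime)
          (pvLoop_eq_lookup (PySem.Str.lower s))
      · simp only [ext_from, ext_from_alt, if_neg hs]
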